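-- pv_equiv track=rewrite | github.com/moguonyanko/algorithmer | python/algorithm.py | encrypt_V1
-- ===== SOURCE A (Python) =====
-- def encrypt_V1(numbers):
-- 	ans = 0
-- 	rng = range(len(numbers))
-- 	for i in rng:
-- 		seki = 1
-- 		for j in rng:
-- 			if i == j: #自分のターンなら自分に1足して掛ける。つまりここは1足す項を探すためのループ。
-- 				seki *= (numbers[j]+1)
-- 			else:
-- 				seki *= numbers[j]
--
-- 		ans = max(ans, seki)
--
-- 	return ans
-- ===== SOURCE B (Python) =====
-- def encrypt_V1(numbers):
--     # suffix products: suf[i] = product of numbers[i:]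
--     suf = [1]
--     for x in reversed(numbers):
--         suf.append(suf[-1] * x)
--     suf.reverse()
--     ans = 0
--     pre = 1
--     for i, x in enumerate(numbers):
--         ans = max(ans, pre * (x + 1) * suf[i + 1])
--         pre *= x
--     return ans
-- ===== Notes on version B (the rewrite author's own statement) =====
-- stated objective: faster
-- what changed: Replaced A's nested loop (recomputing the whole product for each incremented position) with a precomputed suffix-product list and a running prefix product, so each candidate product is formed in O(1).
import Mathlib
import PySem

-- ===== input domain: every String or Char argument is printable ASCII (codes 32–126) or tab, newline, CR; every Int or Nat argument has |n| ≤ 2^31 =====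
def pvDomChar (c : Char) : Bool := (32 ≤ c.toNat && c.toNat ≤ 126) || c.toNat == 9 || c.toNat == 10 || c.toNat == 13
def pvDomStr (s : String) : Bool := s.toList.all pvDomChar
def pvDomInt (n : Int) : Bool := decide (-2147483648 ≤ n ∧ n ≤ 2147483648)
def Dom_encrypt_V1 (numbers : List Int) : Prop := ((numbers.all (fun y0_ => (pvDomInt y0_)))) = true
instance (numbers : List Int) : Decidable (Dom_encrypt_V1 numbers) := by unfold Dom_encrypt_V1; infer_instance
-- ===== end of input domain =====

-- B replaces A's quadratic double loop by a suffix-product list plus a running prefix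
-- product, computing each "one element incremented" product in O(1) per element.

-- ===== PORT A =====
-- A: for each i in range(len(numbers)), an inner pass over the same range multiplies
-- numbers[j] (numbers[i]+1 when j = i) into seki; ans = max(ans, seki), starting from 0.
-- Indices from the range are always valid, so numbers[j] is ported as pyGetD numbers j 0
-- (the default is never used).
def encrypt_V1 (numbers : List Int) : Int :=
  (PySem.List.pyRange 0 (PySem.List.len numbers) 1).foldl (fun ans i =>
    max ans ((PySem.List.pyRange 0 (PySem.List.len numbers) 1).foldl
      (fun seki j => if i = j then seki * (PySem.List.pyGetD numbers j 0 + 1)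
                     else seki * PySem.List.pyGetD numbers j 0) 1)) 0

-- ===== PORT B =====
-- suffix-product list: sufProds l = [prod l, prod l.tail, …, 1]  (Source B's reversed-append
-- loop, written as the structural recursion building the same list)
def sufProds : List Int → List Int
  | [] => [1]
  | x :: xs => (x * (sufProds xs).headD 1) :: sufProds xs

-- Source B's enumerate loop: walk the list with the running prefix product `pre` and the
-- suffix-product list aligned so that suf.headD 1 = product of the elements after the current one.
def encAux : List Int → List Int → Int → Int → Int
  | [], _, ans, _ => ans
  | x :: xs, suf, ans, pre =>
    encAux xs suf.tail (max ans (pre * (x + 1) * suf.headD 1)) (pre * x)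

def encrypt_V1_alt (numbers : List Int) : Int :=
  encAux numbers (sufProds numbers).tail 0 1

-- ===== PRECONDITION & SPEC =====
def Spec_encrypt_V1 (numbers : List Int) (out : Int) : Prop := out = encrypt_V1_alt numbers
instance (numbers : List Int) (out : Int) : Decidable (Spec_encrypt_V1 numbers out) := by unfold Spec_encrypt_V1; infer_instance

-- ===== CLAIM (what is proved, stated in full; the proofs are below) =====
def Claim_equal_encrypt_V1 : Prop := ∀ (numbers : List Int), Dom_encrypt_V1 numbers → Spec_encrypt_V1 numbers (encrypt_V1 numbers)

-- ===== LEMMAS AND PROOFS =====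

-- reference form both ports are reduced to: fold over the list carrying (pre, ans)
def candFold : List Int → Int → Int → Int
  | [], _, ans => ans
  | x :: xs, pre, ans => candFold xs (pre * x) (max ans (pre * (x + 1) * xs.prod))

-- B side ----------------------------------------------------------------
lemma sufProds_headD (l : List Int) : (sufProds l).headD 1 = l.prod := by
  induction l with
  | nil => rfl
  | cons x xs ih =>
    show x * (sufProds xs).headD 1 = _
    rw [ih, List.prod_cons]

lemma encAux_eq (l : List Int) : ∀ ans pre, encAux l (sufProds l).tail ans pre = candFold l pre ans := by
  induction l with
  | nil => intro ans pre; rfl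
  | cons x xs ih =>
    intro ans pre
    show encAux xs (sufProds xs).tail (max ans (pre * (x + 1) * (sufProds xs).headD 1)) (pre * x) = _
    rw [ih, sufProds_headD]
    rfl

lemma alt_eq_candFold (numbers : List Int) : encrypt_V1_alt numbers = candFold numbers 1 0 := by
  simpa [encrypt_V1_alt] using encAux_eq numbers 0 1

-- A side ----------------------------------------------------------------

-- fold of a pure multiply over a segment of indices = product of the slice
lemma foldl_mul_seg (xs : List Int) (a : Nat) : ∀ (m : Nat) (s : Int), a + m ≤ xs.length →
    (PySem.List.pyRange (a : Int) ((a : Int) + (m : Int)) 1).foldl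
      (fun s j => s * PySem.List.pyGetD xs j 0) s
      = s * ((xs.drop a).take m).prod := by
  intro m
  induction m with
  | zero => intro s h; simp [PySem.List.pyRange_one_eq_nil]
  | succ m ih =>
    intro s h
    have hle : (a : Int) ≤ (a : Int) + (m : Int) := by omega
    have hstep : ((a : Int) + ((m + 1 : Nat) : Int)) = ((a : Int) + (m : Int)) + 1 := by
      push_cast; ring
    rw [hstep, PySem.List.pyRange_one_succ_right hle, List.foldl_append]
    rw [ih s (by omega)]
    have hidx : (a : Int) + (m : Int) = ((a + m : Nat) : Int) := by push_cast; ring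
    have hlt : a + m < xs.length := by omega
    have htake : (xs.drop a).take (m + 1) = (xs.drop a).take m ++ [xs[a + m]] := by
      rw [List.take_add_one]
      have : (xs.drop a)[m]? = some xs[a + m] := by
        rw [List.getElem?_drop]
        exact List.getElem?_eq_getElem hlt
      simp [this]
    simp only [List.foldl_cons, List.foldl_nil, htake, List.prod_append, List.prod_cons,
      List.prod_nil, hidx, PySem.List.pyGetD_natCast]
    rw [List.getD_eq_getElem xs 0 hlt]
    ring

lemma inner_eq (xs : List Int) (k : Nat) (hk : k < xs.length) :
    (PySem.List.pyRange 0 (PySem.List.len xs) 1).foldl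
      (fun seki j => if (k : Int) = j then seki * (PySem.List.pyGetD xs j 0 + 1)
                     else seki * PySem.List.pyGetD xs j 0) 1
      = (xs.take k).prod * (xs.getD k 0 + 1) * (xs.drop (k + 1)).prod := by
  have hlen : PySem.List.len xs = (xs.length : Int) := by simp [PySem.List.len]
  have hsplit : PySem.List.pyRange 0 (PySem.List.len xs) 1
      = (PySem.List.pyRange 0 (k : Int) 1 ++ PySem.List.pyRange (k : Int) ((k : Int) + 1) 1)
        ++ PySem.List.pyRange ((k : Int) + 1) (PySem.List.len xs) 1 := by
    rw [← PySem.List.pyRange_one_append 0 (k : Int) ((k : Int) + 1) (by omega) (by omega),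
        ← PySem.List.pyRange_one_append 0 ((k : Int) + 1) (PySem.List.len xs)
          (by omega) (by rw [hlen]; omega)]
  rw [hsplit, List.foldl_append, List.foldl_append]
  -- first segment: k never equals j
  have h1 : (PySem.List.pyRange 0 (k : Int) 1).foldl
      (fun seki j => if (k : Int) = j then seki * (PySem.List.pyGetD xs j 0 + 1)
                     else seki * PySem.List.pyGetD xs j 0) 1 = (xs.take k).prod := by
    rw [PySem.List.foldl_congr_mem _ _ (fun seki j => seki * PySem.List.pyGetD xs j 0) _
      (by intro acc j hj
          have := (PySem.List.mem_pyRange_one.mp hj).2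
          rw [if_neg (by omega)])]
    have := foldl_mul_seg xs 0 k 1 (by omega)
    simpa using this
  rw [h1]
  -- middle: the single index k
  rw [PySem.List.pyRange_one_singleton]
  simp only [List.foldl_cons, List.foldl_nil, if_true]
  -- last segment: j > k
  have h3 : (PySem.List.pyRange ((k : Int) + 1) (PySem.List.len xs) 1).foldl
      (fun seki j => if (k : Int) = j then seki * (PySem.List.pyGetD xs j 0 + 1)
                     else seki * PySem.List.pyGetD xs j 0)
      ((xs.take k).prod * (PySem.List.pyGetD xs (k : Int) 0 + 1))
      = ((xs.take k).prod * (PySem.List.pyGetD xs (k : Int) 0 + 1)) * (xs.drop (k + 1)).prod := by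
    rw [PySem.List.foldl_congr_mem _ _ (fun seki j => seki * PySem.List.pyGetD xs j 0) _
      (by intro acc j hj
          have := (PySem.List.mem_pyRange_one.mp hj).1
          rw [if_neg (by omega)])]
    have hcast : PySem.List.len xs = ((k : Int) + 1) + ((xs.length - (k + 1) : Nat) : Int) := by
      rw [hlen]; omega
    rw [hcast]
    have hseg := foldl_mul_seg xs (k + 1) (xs.length - (k + 1))
        ((xs.take k).prod * (PySem.List.pyGetD xs (k : Int) 0 + 1)) (by omega)
    rw [show (((k + 1 : Nat)) : Int) = (k : Int) + 1 from by push_cast; ring] at hseg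
    rw [hseg]
    have hdrop : (xs.drop (k + 1)).take (xs.length - (k + 1)) = xs.drop (k + 1) := by
      apply List.take_of_length_le; simp
    rw [hdrop]
  rw [h3, PySem.List.pyGetD_natCast]

lemma outer_fold (xs : List Int) : ∀ (pre ans : Int),
    (List.range xs.length).foldl
      (fun ans k => max ans (pre * ((xs.take k).prod * (xs.getD k 0 + 1) * (xs.drop (k + 1)).prod))) ans
      = candFold xs pre ans := by
  induction xs with
  | nil => intro pre ans; rfl
  | cons x xs ih =>
    intro pre ans
    rw [show (x :: xs).length = xs.length + 1 from rfl, List.range_succ_eq_map]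
    simp only [List.foldl_cons, List.foldl_map]
    refine Eq.trans (PySem.List.foldl_congr_mem _ _
      (fun a k => max a ((pre * x) * ((xs.take k).prod * (xs.getD k 0 + 1) * (xs.drop (k + 1)).prod))) _ ?_) ?_
    · intro a k _
      simp only [Nat.succ_eq_add_one, List.take_succ_cons, List.prod_cons,
        List.getD_cons_succ, List.drop_succ_cons]
      congr 1
      ring
    · rw [ih]
      show candFold xs (pre * x) _ = candFold xs (pre * x) (max ans (pre * (x + 1) * xs.prod))
      congr 2
      simp only [List.take_zero, List.prod_nil, List.getD_cons_zero, List.drop_succ_cons,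
        List.drop_zero, one_mul]
      ring

lemma a_eq_candFold (xs : List Int) : encrypt_V1 xs = candFold xs 1 0 := by
  unfold encrypt_V1
  refine Eq.trans (PySem.List.foldl_congr_mem _ _
    (fun a i => max a ((xs.take i.toNat).prod * (xs.getD i.toNat 0 + 1) * (xs.drop (i.toNat + 1)).prod)) _ ?_) ?_
  · intro a i hi
    obtain ⟨h0, hlt⟩ := PySem.List.mem_pyRange_one.mp hi
    have hklt : i.toNat < xs.length := by
      simp [PySem.List.len] at hlt; omega
    have hk : i = ((i.toNat : Nat) : Int) := by omega
    conv_lhs => rw [hk]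
    rw [inner_eq xs i.toNat hklt]
  · have hlen : PySem.List.len xs = (xs.length : Int) := by simp [PySem.List.len]
    rw [hlen, PySem.List.pyRange_zero_nat, List.foldl_map]
    refine Eq.trans (PySem.List.foldl_congr_mem _ _
      (fun a k => max a ((1 : Int) * ((xs.take k).prod * (xs.getD k 0 + 1) * (xs.drop (k + 1)).prod))) _ ?_) ?_
    · intro a k _
      simp only [Int.toNat_natCast, one_mul]
    · exact outer_fold xs 1 0

-- ===== VERDICT (by name: the statement is the Claim_ definition above) =====
theorem encrypt_V1_spec : Claim_equal_encrypt_V1 := by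
  intro numbers _
  show encrypt_V1 numbers = encrypt_V1_alt numbers
  rw [a_eq_candFold, alt_eq_candFold]
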